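-- pv_equiv track=rewrite | github.com/ALMA3112/Gramaticas | Gramaticas/Ejercicio5/Python/ejercicio5.py | es_ejercicio5
-- ===== SOURCE A (Python) =====
-- def es_ejercicio5(cadena):
--     if len(cadena) < 2:
--         return False
--
--     # Debe empezar en 'a' y terminar en 'b'
--     if not (cadena[0] == "a" and cadena[-1] == "b"):
--         return False
--
--     # Quitamos la primera y la última letra
--     medio = cadena[1:-1]
--
--     # Revisamos que esté compuesto únicamente por repeticiones de "ab"
--     i = 0
--     while i < len(medio):
--         if i + 1 < len(medio) and medio[i] == "a" and medio[i+1] == "b":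
--             i += 2
--         else:
--             return False
--
--     return True
-- ===== SOURCE B (Python) =====
-- def es_ejercicio5(cadena):
--     if len(cadena) < 2:
--         return False
--     if cadena[0] != "a" or cadena[-1] != "b":
--         return False
--     medio = cadena[1:-1]
--     return medio == "ab" * (len(medio) // 2)
-- ===== Notes on version B (the rewrite author's own statement) =====
-- stated objective: simpler
-- what changed: The while-loop that steps an index over the middle in pairs is replaced by building the expected (ab)* block with string repetition and one equality comparison; no loop or index remains.
import Mathlib
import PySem

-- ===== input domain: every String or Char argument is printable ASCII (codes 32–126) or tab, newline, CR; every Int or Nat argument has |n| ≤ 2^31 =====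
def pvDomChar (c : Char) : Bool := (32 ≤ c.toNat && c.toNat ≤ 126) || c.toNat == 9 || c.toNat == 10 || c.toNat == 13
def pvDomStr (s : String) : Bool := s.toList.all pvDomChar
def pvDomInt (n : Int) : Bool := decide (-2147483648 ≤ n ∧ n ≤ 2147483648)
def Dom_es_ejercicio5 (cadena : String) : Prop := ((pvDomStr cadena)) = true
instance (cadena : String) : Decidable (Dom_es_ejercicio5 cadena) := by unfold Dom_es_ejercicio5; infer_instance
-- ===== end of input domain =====

-- B replaces A's pair-stepping while-loop over the middle by one comparison with the
-- constructed "ab"*(len//2) block (objective: simpler).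

-- ===== PORT A =====
-- the while-loop of A: i steps by 2 while the pair (medio[i], medio[i+1]) is 'a','b'
def es_ejercicio5_loop (medio : List Char) (i : Nat) : Bool :=
  if i < medio.length then
    if i + 1 < medio.length && medio.getD i ' ' == 'a' && medio.getD (i+1) ' ' == 'b' then
      es_ejercicio5_loop medio (i + 2)
    else
      false
  else
    true
termination_by medio.length - i

def es_ejercicio5 (cadena : String) : Bool :=
  let cs := cadena.toList
  if cs.length < 2 then false
  else if !(PySem.List.pyGetD cs 0 ' ' == 'a' && PySem.List.pyGetD cs (-1) ' ' == 'b') then false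
  else
    let medio := PySem.List.slice cs (some 1) (some (-1))
    es_ejercicio5_loop medio 0

-- ===== PORT B =====
def es_ejercicio5_alt (cadena : String) : Bool :=
  let cs := cadena.toList
  if cs.length < 2 then false
  else if !(PySem.List.pyGetD cs 0 ' ' == 'a') || !(PySem.List.pyGetD cs (-1) ' ' == 'b') then false
  else
    let medio := PySem.List.slice cs (some 1) (some (-1))
    medio == (List.replicate (medio.length / 2) ['a', 'b']).flatten

-- ===== PRECONDITION & SPEC =====
def Spec_es_ejercicio5 (cadena : String) (out : Bool) : Prop := out = es_ejercicio5_alt cadena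
instance (cadena : String) (out : Bool) : Decidable (Spec_es_ejercicio5 cadena out) := by unfold Spec_es_ejercicio5; infer_instance

-- ===== CLAIM (what is proved, stated in full; the proofs are below) =====
def Claim_equal_es_ejercicio5 : Prop := ∀ (cadena : String), Dom_es_ejercicio5 cadena → Spec_es_ejercicio5 cadena (es_ejercicio5 cadena)

-- ===== LEMMAS AND PROOFS =====

-- structural two-step reading of A's loop, used only by the proofs
def pvRepOK : List Char → Bool
  | [] => true
  | 'a' :: 'b' :: rest => pvRepOK rest
  | _ => false

theorem pvRepOK_single (x : Char) : pvRepOK [x] = false := by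
  rw [pvRepOK.eq_def]; split <;> simp_all

theorem pvRepOK_pair (x y : Char) (rest : List Char) (h : ¬(x = 'a' ∧ y = 'b')) :
    pvRepOK (x :: y :: rest) = false := by
  rw [pvRepOK.eq_def]; split <;> simp_all

theorem es_ejercicio5_loop_eq (l : List Char) (i : Nat) :
    es_ejercicio5_loop l i = pvRepOK (l.drop i) := by
  rw [es_ejercicio5_loop]
  by_cases hi : i < l.length
  · by_cases hi1 : i + 1 < l.length
    · have hdrop : l.drop i = l[i] :: l[i+1] :: l.drop (i+2) := by
        rw [List.drop_eq_getElem_cons hi]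
        congr 1
        rw [List.drop_eq_getElem_cons hi1]
      have ih := es_ejercicio5_loop_eq l (i+2)
      by_cases hab : l[i] = 'a' ∧ l[i+1] = 'b'
      · obtain ⟨ha, hb⟩ := hab
        simp [hi, hi1, List.getD_eq_getElem?_getD, ha, hb,
          hdrop, ih, pvRepOK]
      · rw [hdrop, pvRepOK_pair _ _ _ hab]
        simp [hi, hi1, List.getD_eq_getElem?_getD]
        tauto
    · have hlen : l.length = i + 1 := by omega
      have hdrop : l.drop i = [l[i]] := by
        rw [List.drop_eq_getElem_cons hi]
        simp [List.drop_eq_nil_of_le, hlen]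
      rw [hdrop, pvRepOK_single]
      simp [hi, hi1]
  · have hd : l.drop i = [] := List.drop_eq_nil_of_le (by omega)
    simp [hi, hd, pvRepOK]
termination_by l.length - i

theorem pvRepOK_eq (l : List Char) :
    pvRepOK l = (l == (List.replicate (l.length / 2) ['a', 'b']).flatten) := by
  match l with
  | [] => simp [pvRepOK]
  | [x] => rw [pvRepOK_single]; simp
  | x :: y :: rest =>
    have ih := pvRepOK_eq rest
    have h2 : (rest.length + 1 + 1) / 2 = rest.length / 2 + 1 := by omega
    by_cases hab : x = 'a' ∧ y = 'b'
    · obtain ⟨hx, hy⟩ := hab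
      subst hx; subst hy
      simp [pvRepOK, ih, h2, List.replicate_succ]
    · rw [pvRepOK_pair _ _ _ hab]
      simp [h2, List.replicate_succ]
      tauto
termination_by l.length

-- ===== VERDICT (by name: the statement is the Claim_ definition above) =====
theorem es_ejercicio5_spec : Claim_equal_es_ejercicio5 := by
  intro cadena _
  unfold Spec_es_ejercicio5 es_ejercicio5 es_ejercicio5_alt
  simp [es_ejercicio5_loop_eq, pvRepOK_eq]
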